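-- pv_equiv track=rewrite | github.com/olivierjuanedf/eurec-2026-vahidemad | include/dataset_builder.py | set_per_bus_asset_msg
-- ===== SOURCE A (Python) =====
-- from typing import Dict, List, Tuple, Optional, Union
--
-- def set_per_bus_asset_msg(asset_names: List[str]):
--     """
--     List of {bus name}_{asset name} to be converted to more elegant msg
--     """
--     name_sep = '_'
--     # get dict. gathering asset names per bus
--     per_bus_assets = {}
--     for full_name in asset_names:
--         name_split = full_name.split(name_sep)
--         bus_name = name_split[0]
--         asset_name = name_sep.join(name_split[1:])
--         if bus_name not in per_bus_assets:
--             per_bus_assets[bus_name] = []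
--         per_bus_assets[bus_name].append(asset_name)
--     # get log message with one line per bus
--     per_bus_msg = ''
--     for bus, assets in per_bus_assets.items():
--         per_bus_msg += f'\n- {bus}: {assets}'
--     return per_bus_msg
-- ===== SOURCE B (Python) =====
-- from typing import List
--
-- def set_per_bus_asset_msg(asset_names: List[str]):
--     """
--     List of {bus name}_{asset name} to be converted to more elegant msg
--     """
--     # Dict-free two-phase scheme: split every name once into (bus, asset),
--     # take buses in first-occurrence order, then build each bus's line by
--     # re-filtering the split pairs.
--     pairs = []
--     for name in asset_names:
--         toks = name.split('_')
--         pairs.append((toks[0], '_'.join(toks[1:])))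
--     buses = []
--     for bus, _ in pairs:
--         if bus not in buses:
--             buses.append(bus)
--     msg = ''
--     for bus in buses:
--         assets = [asset for b, asset in pairs if b == bus]
--         msg += '\n- {}: {}'.format(bus, assets)
--     return msg
-- ===== Notes on version B (the rewrite author's own statement) =====
-- stated objective: alternative
-- what changed: Replaces A's dict grouping + items loop with a dict-free staged scheme: split each name once into a (bus, asset) pair, collect buses in first-occurrence order, then build each line by re-filtering the pairs per bus.
import Mathlib
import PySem

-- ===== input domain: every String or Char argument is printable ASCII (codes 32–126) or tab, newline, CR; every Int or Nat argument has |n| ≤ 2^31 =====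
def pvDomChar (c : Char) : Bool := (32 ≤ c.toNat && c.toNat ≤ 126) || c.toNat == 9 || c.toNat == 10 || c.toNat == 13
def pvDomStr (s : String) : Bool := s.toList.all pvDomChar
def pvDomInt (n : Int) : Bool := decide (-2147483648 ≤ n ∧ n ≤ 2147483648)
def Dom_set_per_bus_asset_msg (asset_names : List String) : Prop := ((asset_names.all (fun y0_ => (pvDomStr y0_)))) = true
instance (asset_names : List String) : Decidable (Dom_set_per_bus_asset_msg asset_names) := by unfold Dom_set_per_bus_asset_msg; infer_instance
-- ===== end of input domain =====

-- B drops A's dict entirely: it splits each name once into a (bus, asset) pair,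
-- takes the buses in first-occurrence order, and re-filters the pairs per bus —
-- alternative decomposition, same values.

-- shared formatting helpers: the f-string '\n- {bus}: {assets}' with Python's repr of a
-- list of strings (exact for the printable-ASCII + tab/newline/CR domain)
def pvEsc (q c : Char) : List Char :=
  if c = '\\' then ['\\', '\\']
  else if c = q then ['\\', q]
  else if c = '\n' then ['\\', 'n']
  else if c = '\r' then ['\\', 'r']
  else if c = '\t' then ['\\', 't']
  else [c]

def pvRepr (cs : List Char) : List Char :=
  let q := if cs.contains '\'' && !(cs.contains '"') then '"' else '\''
  q :: cs.flatMap (pvEsc q) ++ [q]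

def pvListRepr (assets : List (List Char)) : List Char :=
  '[' :: List.intercalate [',', ' '] (assets.map pvRepr) ++ [']']

def pvLine (bus : List Char) (assets : List (List Char)) : List Char :=
  '\n' :: '-' :: ' ' :: bus ++ ':' :: ' ' :: pvListRepr assets

-- full_name.split('_')[0]  (split never returns an empty list, so the index is in range)
def pvBus (cs : List Char) : List Char :=
  PySem.List.pyGetD (PySem.Chars.splitOn cs ['_']) 0 []

-- '_'.join(full_name.split('_')[1:])
def pvAsset (cs : List Char) : List Char :=
  PySem.Chars.join ['_'] (PySem.List.slice (PySem.Chars.splitOn cs ['_']) (some 1) none)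

-- ===== PORT A =====
def set_per_bus_asset_msg (asset_names : List String) : String :=
  let names := asset_names.map String.toList
  let perBusAssets : PySem.Dict (List Char) (List (List Char)) :=
    names.foldl (fun d fullName =>
      let busName := pvBus fullName
      let assetName := pvAsset fullName
      -- if bus_name not in per_bus_assets: per_bus_assets[bus_name] = []
      let d := if d.contains busName then d else d.insert busName []
      -- per_bus_assets[bus_name].append(asset_name)
      d.modify busName [] (fun l => l ++ [assetName])) PySem.Dict.empty
  -- per_bus_msg += f'\n- {bus}: {assets}'
  String.mk (perBusAssets.items.foldl (fun m p => m ++ pvLine p.1 p.2) [])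

-- ===== PORT B =====
-- Source B's three loops as structural recursions: split once into (bus, asset) pairs,
-- first-occurrence bus list, then one filtering scan per bus
def pvPairs : List (List Char) → List (List Char × List Char)
  | [] => []
  | n :: rest =>
      let toks := PySem.Chars.splitOn n ['_']
      (PySem.List.pyGetD toks 0 [],
       PySem.Chars.join ['_'] (PySem.List.slice toks (some 1) none)) :: pvPairs rest

def pvBusesGo (acc : List (List Char)) : List (List Char × List Char) → List (List Char)
  | [] => acc
  | p :: rest =>
      if acc.contains p.1 then pvBusesGo acc rest else pvBusesGo (acc ++ [p.1]) rest

def pvLinesGo (pairs : List (List Char × List Char)) (msg : List Char) :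
    List (List Char) → List Char
  | [] => msg
  | bus :: rest =>
      pvLinesGo pairs
        (msg ++ pvLine bus ((pairs.filter (fun p => p.1 == bus)).map Prod.snd)) rest

def set_per_bus_asset_msg_alt (asset_names : List String) : String :=
  let pairs := pvPairs (asset_names.map String.toList)
  String.mk (pvLinesGo pairs [] (pvBusesGo [] pairs))

-- ===== PRECONDITION & SPEC =====
def Spec_set_per_bus_asset_msg (asset_names : List String) (out : String) : Prop := out = set_per_bus_asset_msg_alt asset_names
instance (asset_names : List String) (out : String) : Decidable (Spec_set_per_bus_asset_msg asset_names out) := by unfold Spec_set_per_bus_asset_msg; infer_instance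

-- ===== CLAIM (what is proved, stated in full; the proofs are below) =====
def Claim_equal_set_per_bus_asset_msg : Prop := ∀ (asset_names : List String), Dom_set_per_bus_asset_msg asset_names → Spec_set_per_bus_asset_msg asset_names (set_per_bus_asset_msg asset_names)

-- ===== LEMMAS AND PROOFS =====

-- proof-side notions: B's asset list per bus, the ordered new buses of a suffix
def pvAssetsOf (names : List (List Char)) (b : List Char) : List (List Char) :=
  (names.filter (fun n => pvBus n == b)).map pvAsset

-- A's conditional "insert [] then append" step is the plain modify step
theorem pvStepA_eq (d : PySem.Dict (List Char) (List (List Char))) (bus asset : List Char) :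
    (if d.contains bus then d else d.insert bus []).modify bus [] (fun l => l ++ [asset])
      = d.modify bus [] (fun l => l ++ [asset]) := by
  by_cases h : d.contains bus
  · simp [h]
  · have h' : d.contains bus = false := by simpa using h
    simp only [h', Bool.false_eq_true, ite_false, PySem.Dict.modify,
      PySem.Dict.getD_insert_self, PySem.Dict.insert_insert_self,
      PySem.Dict.getD_of_not_contains d [] h']

-- A's result, characterised as one line per first-occurrence bus
theorem pvA_flat (asset_names : List String) :
    set_per_bus_asset_msg asset_names =
      String.mk (((asset_names.map String.toList).foldl
          (fun (acc : List (List Char)) n =>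
            let b := pvBus n
            if acc.contains b then acc else acc ++ [b]) []).flatMap
        (fun b => pvLine b (pvAssetsOf (asset_names.map String.toList) b))) := by
  unfold set_per_bus_asset_msg
  dsimp only
  set names := asset_names.map String.toList with hnames
  clear_value names
  have hfold :
      (names.foldl (fun d fullName =>
          let busName := pvBus fullName
          let assetName := pvAsset fullName
          let d := if d.contains busName then d else d.insert busName []
          d.modify busName [] (fun l => l ++ [assetName])) PySem.Dict.empty)
      = names.foldl (fun d n => d.modify (pvBus n) [] (fun l => l ++ [pvAsset n]))
          PySem.Dict.empty := by
    congr 1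
    funext d n
    exact pvStepA_eq d (pvBus n) (pvAsset n)
  rw [hfold]
  set D := names.foldl (fun d n => d.modify (pvBus n) [] (fun l => l ++ [pvAsset n]))
      PySem.Dict.empty with hD
  have hkeys : D.keys = names.foldl (fun (acc : List (List Char)) n =>
      let b := pvBus n
      if acc.contains b then acc else acc ++ [b]) [] := by
    rw [hD, PySem.Dict.keys_foldl_modify_key names pvBus []
      (fun _ n => fun l => l ++ [pvAsset n]) PySem.Dict.empty]
    rw [PySem.Dict.keys_empty]
    show List.foldl PySem.Set.add [] (names.map pvBus) = _
    rw [List.foldl_map]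
    simp only [PySem.Set.add]
    rfl
  have hnodup : D.keys.Nodup := by
    rw [hD]
    exact PySem.Dict.nodup_keys_foldl_modify_key names pvBus []
      (fun _ n => fun l => l ++ [pvAsset n]) PySem.Dict.empty
      (by simp [PySem.Dict.keys_empty])
  have hgetD : ∀ b, D.getD b [] = pvAssetsOf names b := by
    intro b
    have hmap : D = (names.map (fun n => (pvBus n, pvAsset n))).foldl
        (fun d p => d.modify p.1 [] (fun l => l ++ [p.2])) PySem.Dict.empty := by
      rw [hD, List.foldl_map]
    rw [hmap, PySem.Dict.getD_foldl_modify_append, PySem.Dict.getD_empty]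
    simp [pvAssetsOf, List.filter_map, List.map_map, Function.comp_def]
  have hitems : D.items = D.keys.map (fun k => (k, D.getD k [])) :=
    PySem.Dict.items_eq_map_keys D hnodup []
  rw [hitems]
  simp only [List.foldl_map]
  rw [PySem.List.foldl_append_eq_flatMap (fun k => pvLine k (D.getD k []))]
  simp only [List.nil_append, ← hkeys]
  congr 1
  exact List.flatMap_congr (by intro k _; rw [hgetD k])

-- pvPairs is the map of (bus, asset)
theorem pvPairs_eq : ∀ (ns : List (List Char)),
    pvPairs ns = ns.map (fun n => (pvBus n, pvAsset n)) := by
  intro ns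
  induction ns with
  | nil => rfl
  | cons n rest ih => simp [pvPairs, pvBus, pvAsset, ih]

-- the bus recursion is A-side's first-occurrence foldl
theorem pvBusesGo_eq (ns : List (List Char)) :
    ∀ (acc : List (List Char)),
      pvBusesGo acc (ns.map (fun n => (pvBus n, pvAsset n)))
        = List.foldl (fun (acc : List (List Char)) n =>
            let b := pvBus n
            if acc.contains b then acc else acc ++ [b]) acc ns := by
  induction ns with
  | nil => intro acc; rfl
  | cons n rest ih =>
      intro acc
      simp only [List.map_cons, pvBusesGo, List.foldl_cons]
      by_cases hc : acc.contains (pvBus n)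
      · rw [if_pos hc, if_pos hc, ih acc]
      · rw [if_neg hc, if_neg hc, ih (acc ++ [pvBus n])]

-- the line recursion flattens to one pvLine per bus
theorem pvLinesGo_eq (pairs : List (List Char × List Char)) :
    ∀ (buses : List (List Char)) (msg : List Char),
      pvLinesGo pairs msg buses
        = msg ++ buses.flatMap
            (fun b => pvLine b ((pairs.filter (fun p => p.1 == b)).map Prod.snd)) := by
  intro buses
  induction buses with
  | nil => intro msg; simp [pvLinesGo]
  | cons bus rest ih => intro msg; simp [pvLinesGo, ih]

-- filtering the pairs gives B's asset list
theorem pvPairs_filter (ns : List (List Char)) (b : List Char) :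
    ((ns.map (fun n => (pvBus n, pvAsset n))).filter (fun p => p.1 == b)).map Prod.snd
      = pvAssetsOf ns b := by
  simp [pvAssetsOf, List.filter_map, List.map_map, Function.comp_def]

theorem set_per_bus_asset_msg_eq (asset_names : List String) :
    set_per_bus_asset_msg asset_names = set_per_bus_asset_msg_alt asset_names := by
  rw [pvA_flat]
  unfold set_per_bus_asset_msg_alt
  dsimp only
  rw [pvPairs_eq, pvBusesGo_eq, pvLinesGo_eq]
  simp only [List.nil_append]
  congr 1
  exact List.flatMap_congr (by
    intro b _
    rw [pvPairs_filter])

-- ===== VERDICT (by name: the statement is the Claim_ definition above) =====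
theorem set_per_bus_asset_msg_spec : Claim_equal_set_per_bus_asset_msg := by
  intro asset_names _
  unfold Spec_set_per_bus_asset_msg
  exact set_per_bus_asset_msg_eq asset_names
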